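-- pv_equiv track=rewrite | github.com/PolarBear85/freecodecamp-projects | Python/Daily_Code_Challenge/250829-burn-candles.py | burn_candles
-- ===== SOURCE A (Python) =====
-- def burn_candles(candles, leftovers_needed):
--
--     total_burned = 0
--     unused_wax = 0
--
--     while candles > 0:
--         total_burned +=candles
--         total_wax = candles + unused_wax
--         candles,unused_wax = divmod(total_wax, leftovers_needed)
--
--     return total_burned
-- ===== SOURCE B (Python) =====
-- def burn_candles(candles, leftovers_needed):
--     # Closed-form candle exchange: each burned candle leaves one wax unit,
--     # leftovers_needed units make one new candle, so for leftovers_needed >= 2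
--     # total burned = candles + (candles - 1) // (leftovers_needed - 1).
--     if candles <= 0:
--         return 0
--     if leftovers_needed >= 2:
--         return candles + (candles - 1) // (leftovers_needed - 1)
--     # leftovers_needed negative: the exchange never yields a positive candle,
--     # so only the initial candles burn.
--     return candles
-- ===== Notes on version B (the rewrite author's own statement) =====
-- stated objective: faster
-- what changed: Replaced the simulation loop with the closed-form exchange identity candles + (candles-1)//(leftovers_needed-1) (and a direct case for negative leftovers_needed), removing the loop entirely.
import Mathlib
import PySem

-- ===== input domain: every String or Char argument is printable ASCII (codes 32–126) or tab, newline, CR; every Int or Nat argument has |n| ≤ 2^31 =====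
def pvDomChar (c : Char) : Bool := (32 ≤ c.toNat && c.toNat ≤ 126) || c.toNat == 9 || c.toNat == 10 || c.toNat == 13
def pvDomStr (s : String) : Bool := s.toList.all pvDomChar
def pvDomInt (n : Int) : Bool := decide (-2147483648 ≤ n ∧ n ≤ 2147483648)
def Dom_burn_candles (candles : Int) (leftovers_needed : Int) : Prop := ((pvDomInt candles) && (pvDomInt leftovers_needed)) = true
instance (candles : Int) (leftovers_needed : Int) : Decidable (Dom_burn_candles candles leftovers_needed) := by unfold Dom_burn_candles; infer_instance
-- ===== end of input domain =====

-- B replaces A's burn-and-exchange simulation loop with the closed-form identity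
-- candles + (candles-1)//(leftovers_needed-1) (O(1) instead of O(candles) iterations).


-- ===== PORT A =====
-- the while loop; fuel only makes the recursion total, it is never exhausted on
-- inputs satisfying Pre_ ∧ Dom (proved below); on fuel 0 / divmod-by-zero it
-- returns the accumulator (junk, outside Pre_).
def burnLoop (leftovers_needed : Int) : Nat → Int → Int → Int → Int
  | 0, _, _, total_burned => total_burned
  | fuel + 1, candles, unused_wax, total_burned =>
    if candles > 0 then
      let total_burned' := total_burned + candles
      let total_wax := candles + unused_wax
      match PySem.Int.divmod? total_wax leftovers_needed with
      | none => total_burned'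
      | some (c, w) => burnLoop leftovers_needed fuel c w total_burned'
    else total_burned

def burn_candles (candles : Int) (leftovers_needed : Int) : Int :=
  burnLoop leftovers_needed 4611686018427387905 candles 0 0

-- ===== PORT B =====
def burn_candles_alt (candles : Int) (leftovers_needed : Int) : Int :=
  if candles ≤ 0 then 0
  else if 2 ≤ leftovers_needed then
    candles + PySem.Int.floordiv (candles - 1) (leftovers_needed - 1)
  else candles

-- ===== PRECONDITION & SPEC =====
-- Pre_ excludes exactly leftovers_needed = 0 with candles > 0 (A raises
-- ZeroDivisionError) and leftovers_needed = 1 with candles > 0 (A loops forever).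
def Pre_burn_candles (candles : Int) (leftovers_needed : Int) : Prop :=
  candles ≤ 0 ∨ (leftovers_needed ≠ 0 ∧ leftovers_needed ≠ 1)
instance (candles : Int) (leftovers_needed : Int) : Decidable (Pre_burn_candles candles leftovers_needed) := by unfold Pre_burn_candles; infer_instance

def pvWitness_burn_candles : Int × Int := (10, 3)

def Spec_burn_candles (candles : Int) (leftovers_needed : Int) (out : Int) : Prop := out = burn_candles_alt candles leftovers_needed
instance (candles : Int) (leftovers_needed : Int) (out : Int) : Decidable (Spec_burn_candles candles leftovers_needed out) := by unfold Spec_burn_candles; infer_instance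

-- ===== CLAIM (what is proved, stated in full; the proofs are below) =====
def Claim_equal_burn_candles : Prop := ∀ (candles : Int) (leftovers_needed : Int), Dom_burn_candles candles leftovers_needed → Pre_burn_candles candles leftovers_needed → Spec_burn_candles candles leftovers_needed (burn_candles candles leftovers_needed)

-- ===== LEMMAS AND PROOFS =====

lemma burnLoop_pos_step (k : Int) (n : Nat) (c wax t q r : Int) (hc : 0 < c)
    (hdm : PySem.Int.divmod? (c + wax) k = some (q, r)) :
    burnLoop k (n + 1) c wax t = burnLoop k n q r (t + c) := by
  simp only [burnLoop, if_pos hc, hdm]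

-- closed form of the loop for k ≥ 2: the remaining burn from state (c, wax).
lemma burnLoop_closed (k : Int) (hk : 2 ≤ k) :
    ∀ (fuel : Nat) (c wax t : Int), 0 ≤ wax →
      (c ≤ 0 ∨ (c * k + wax).toNat < fuel) →
      burnLoop k fuel c wax t =
        t + (if c ≤ 0 then 0 else c + (c + wax - 1).fdiv (k - 1)) := by
  intro fuel
  induction fuel with
  | zero =>
    intro c wax t hw hb
    rcases hb with hc | hb
    · simp [burnLoop, hc]
    · omega
  | succ n ih =>
    intro c wax t hw hb
    by_cases hc : c ≤ 0
    · simp [burnLoop, hc, not_lt.mpr hc]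
    · push Not at hc
      have hk0 : k ≠ 0 := by omega
      have hdm : PySem.Int.divmod? (c + wax) k =
          some (PySem.Int.floordiv (c + wax) k, PySem.Int.mod (c + wax) k) := by
        simp [PySem.Int.divmod?, hk0,
          PySem.Int.floordiv, PySem.Int.mod]
      have hT : (1 : Int) ≤ c + wax := by omega
      set q := PySem.Int.floordiv (c + wax) k with hq
      set r := PySem.Int.mod (c + wax) k with hr
      have hr0 : 0 ≤ r := PySem.Int.mod_nonneg _ (by omega)
      have hrk : r < k := PySem.Int.mod_lt _ (by omega)
      have hqr : q * k + r = c + wax := PySem.Int.floordiv_mul_add_mod _ _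
      have hq0 : 0 ≤ q := by nlinarith
      -- measure strictly decreases: q*k + r = c + wax < c*k + wax
      have hmeas : q * k + r < c * k + wax := by nlinarith
      have hfuel : (q * k + r).toNat < n := by
        rcases hb with h | h
        · omega
        · omega
      have hrec : burnLoop k n q r (t + c) =
          (t + c) + (if q ≤ 0 then 0 else q + (q + r - 1).fdiv (k - 1)) :=
        ih q r (t + c) hr0 (Or.inr hfuel)
      rw [burnLoop_pos_step k n c wax t q r hc hdm, hrec, if_neg (not_le.mpr hc)]
      -- arithmetic identity: (c+wax-1).fdiv (k-1) = if q ≤ 0 then 0 else q + (q+r-1).fdiv (k-1)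
      by_cases hq1 : q ≤ 0
      · -- q = 0 : c + wax = r ∈ [1, k-1]
        have hqz : q = 0 := le_antisymm hq1 hq0
        have hqk : q * k = 0 := by rw [hqz]; ring
        have hcw : c + wax = r := by omega
        have : (c + wax - 1).fdiv (k - 1) = 0 := by
          rw [Int.fdiv_eq_ediv_of_nonneg _ (by omega : (0:Int) ≤ k - 1)]
          exact Int.ediv_eq_zero_of_lt (by omega) (by omega)
        simp [this, hq1]
      · push Not at hq1
        have hsplit : c + wax - 1 = (q + r - 1) + q * (k - 1) := by ring_nf; omega
        have : (c + wax - 1).fdiv (k - 1) = (q + r - 1).fdiv (k - 1) + q := by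
          rw [hsplit, Int.add_mul_fdiv_right _ _ (by omega : k - 1 ≠ 0)]
        rw [if_neg (not_le.mpr hq1), this]
        ring

lemma burnLoop_nonpos (k : Int) (n : Nat) (c wax t : Int) (hc : c ≤ 0) :
    burnLoop k (n + 1) c wax t = t := by
  simp [burnLoop, not_lt.mpr hc]

lemma fuel_succ : (4611686018427387905 : Nat) = 4611686018427387904 + 1 := rfl

-- ===== VERDICT (by name: the statement is the Claim_ definition above) =====
theorem burn_candles_spec : Claim_equal_burn_candles := by
  intro c k hdom hpre
  unfold Dom_burn_candles at hdom
  simp only [pvDomInt, Bool.and_eq_true, decide_eq_true_eq] at hdom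
  obtain ⟨⟨hc1, hc2⟩, hk1, hk2⟩ := hdom
  unfold Spec_burn_candles burn_candles burn_candles_alt
  by_cases hc : c ≤ 0
  · rw [fuel_succ, burnLoop_nonpos _ _ _ _ _ hc, if_pos hc]
  · push Not at hc
    rcases hpre with h | ⟨hk0, hk1'⟩
    · omega
    by_cases hk : 2 ≤ k
    · -- closed form
      have hbound : (c * k + 0).toNat < 4611686018427387905 := by
        have h1 : c * k ≤ 2147483648 * 2147483648 := by
          have := mul_le_mul hc2 hk2 (by omega) (by norm_num)
          linarith
        omega
      rw [burnLoop_closed k hk _ c 0 0 le_rfl (Or.inr hbound)]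
      rw [if_neg (not_le.mpr hc), if_pos hk, if_neg (not_le.mpr hc)]
      have : PySem.Int.floordiv (c - 1) (k - 1) = (c + 0 - 1).fdiv (k - 1) := by
        simp [PySem.Int.floordiv]
      rw [this]; ring
    · -- k ≤ -1 : one iteration, new candle count is nonpositive
      have hkneg : k ≤ -1 := by omega
      have hdm : PySem.Int.divmod? (c + 0) k =
          some (PySem.Int.floordiv (c + 0) k, PySem.Int.mod (c + 0) k) := by
        simp [PySem.Int.divmod?, hk0,
          PySem.Int.floordiv, PySem.Int.mod]
      have hqneg : PySem.Int.floordiv (c + 0) k ≤ 0 := by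
        have h1 := PySem.Int.mod_neg_bounds (c + 0) (by omega : k < 0)
        have h2 := PySem.Int.floordiv_mul_add_mod (c + 0) k
        nlinarith [h1.1, h1.2]
      rw [fuel_succ, burnLoop_pos_step k _ c 0 0 _ _ hc hdm,
        show (4611686018427387904 : Nat) = 4611686018427387903 + 1 from rfl,
        burnLoop_nonpos _ _ _ _ _ hqneg]
      rw [if_neg (not_le.mpr hc), if_neg hk]
      ring
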